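-- pv_equiv track=rewrite | github.com/vador/adventofcode2018 | 11/fuelcellssize.py | findCoordOfMax
-- ===== SOURCE A (Python) =====
-- def findCoordOfMax(grid):
--     curMax = grid[0][0]
--     maxX = 0
--     maxY = 0
--     for i in range(len(grid)):
--         for j in range(len(grid)):
--             curVal = grid[i][j]
--             if curVal > curMax:
--                 curMax = curVal
--                 maxX = i
--                 maxY = j
--     return (maxX, maxY, curMax)
-- ===== SOURCE B (Python) =====
-- def findCoordOfMax(grid):
--     n = len(grid)
--     # stage 1: reduce each row to its (best value, first column achieving it)
--     row_bests = []
--     for row in grid: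
--         bv, bc = row[0], 0
--         for j in range(n):
--             if row[j] > bv:
--                 bv, bc = row[j], j
--         row_bests.append((bv, bc))
--     # stage 2: reduce across rows
--     bi, bj, bm = 0, 0, grid[0][0]
--     for i, (bv, bc) in enumerate(row_bests):
--         if bv > bm:
--             bi, bj, bm = i, bc, bv
--     return (bi, bj, bm)
-- ===== Notes on version B (the rewrite author's own statement) =====
-- stated objective: alternative
-- what changed: Replaces A's single flat running max over the nested index scan by a two-stage reduction: each row is first reduced independently to its (best value, first column), then a second pass over the enumerated per-row maxima picks the overall (row, col, value).
import Mathlib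
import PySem

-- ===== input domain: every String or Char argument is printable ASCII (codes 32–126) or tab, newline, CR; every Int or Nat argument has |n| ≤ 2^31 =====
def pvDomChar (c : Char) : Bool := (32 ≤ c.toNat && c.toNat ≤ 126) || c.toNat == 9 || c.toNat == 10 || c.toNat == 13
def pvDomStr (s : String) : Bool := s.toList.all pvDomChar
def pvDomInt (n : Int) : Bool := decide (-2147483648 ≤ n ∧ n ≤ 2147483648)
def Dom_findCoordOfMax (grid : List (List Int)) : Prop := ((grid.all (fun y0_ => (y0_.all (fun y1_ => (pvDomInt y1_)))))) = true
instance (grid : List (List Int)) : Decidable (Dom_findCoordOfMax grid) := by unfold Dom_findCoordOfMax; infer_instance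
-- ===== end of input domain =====

-- B is an alternative decomposition of the same O(n^2) scan: per-row maxima first, then a
-- reduction across rows; not claimed faster.

-- ===== PORT A =====
-- inner 'for j in range(len(grid))' loop of A, with the enclosing state (maxX, maxY, curMax)
def pvInnerA (i : Int) (row : List Int) (n : Int) (st : Int × Int × Int) : Int × Int × Int :=
  (PySem.List.pyRange 0 n 1).foldl (fun st j =>
    let curVal := PySem.List.pyGetD row j 0
    if curVal > st.2.2 then (i, j, curVal) else st) st

def findCoordOfMax (grid : List (List Int)) : Int × Int × Int :=
  (PySem.List.pyRange 0 (grid.length : Int) 1).foldl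
    (fun st i => pvInnerA i (PySem.List.pyGetD grid i []) (grid.length : Int) st)
    (0, 0, PySem.List.pyGetD (PySem.List.pyGetD grid 0 []) 0 0)

-- ===== PORT B =====
-- stage 1 of B: one row reduced to (best value, first column achieving it)
def pvRowBest (row : List Int) (n : Int) : Int × Int :=
  (PySem.List.pyRange 0 n 1).foldl (fun b j =>
    let v := PySem.List.pyGetD row j 0
    if v > b.1 then (v, j) else b) (PySem.List.pyGetD row 0 0, 0)

def findCoordOfMax_alt (grid : List (List Int)) : Int × Int × Int :=
  let n : Int := (grid.length : Int)
  let rowBests := grid.map (fun row => pvRowBest row n)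
  (PySem.List.enumerate rowBests 0).foldl
    (fun b p => if p.2.1 > b.2.2 then (p.1, p.2.2, p.2.1) else b)
    (0, 0, PySem.List.pyGetD (PySem.List.pyGetD grid 0 []) 0 0)

-- ===== PRECONDITION & SPEC =====
-- Pre_ excludes exactly the inputs where the Python A raises IndexError:
-- the empty grid (grid[0][0]) and grids with a row shorter than len(grid) (grid[i][j]).
def Pre_findCoordOfMax (grid : List (List Int)) : Prop :=
  grid ≠ [] ∧ ∀ row ∈ grid, grid.length ≤ row.length
instance (grid : List (List Int)) : Decidable (Pre_findCoordOfMax grid) := by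
  unfold Pre_findCoordOfMax; infer_instance
def pvWitness_findCoordOfMax : List (List Int) := [[1, 2], [4, 3]]

def Spec_findCoordOfMax (grid : List (List Int)) (out : Int × Int × Int) : Prop := out = findCoordOfMax_alt grid
instance (grid : List (List Int)) (out : Int × Int × Int) : Decidable (Spec_findCoordOfMax grid out) := by unfold Spec_findCoordOfMax; infer_instance

-- ===== CLAIM (what is proved, stated in full; the proofs are below) =====
def Claim_equal_findCoordOfMax : Prop := ∀ (grid : List (List Int)), Dom_findCoordOfMax grid → Pre_findCoordOfMax grid → Spec_findCoordOfMax grid (findCoordOfMax grid)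

-- ===== LEMMAS AND PROOFS =====

theorem pv_foldl_congr_mem {α β : Type} (l : List α) (f g : β → α → β) (init : β)
    (h : ∀ st a, a ∈ l → f st a = g st a) : l.foldl f init = l.foldl g init := by
  induction l generalizing init with
  | nil => rfl
  | cons x xs ih =>
      simp only [List.foldl_cons]
      rw [h init x (by simp)]
      exact ih _ (fun st a ha => h st a (by simp [ha]))

-- A's inner loop over a row equals B's row reduction followed by a single conditional update.
theorem pv_innerA_succ (i : Int) (row : List Int) (n : Int) (hn : 0 ≤ n) (st : Int × Int × Int) :
    pvInnerA i row (n + 1) st =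
      (let st' := pvInnerA i row n st;
       let v := PySem.List.pyGetD row n 0;
       if v > st'.2.2 then (i, n, v) else st') := by
  simp only [pvInnerA]
  rw [PySem.List.pyRange_one_succ_right (a := 0) (b := n) hn]
  simp only [List.foldl_append, List.foldl_cons, List.foldl_nil]

theorem pv_rowBest_succ (row : List Int) (n : Int) (hn : 0 ≤ n) :
    pvRowBest row (n + 1) =
      (let b := pvRowBest row n;
       let v := PySem.List.pyGetD row n 0;
       if v > b.1 then (v, n) else b) := by
  simp only [pvRowBest]
  rw [PySem.List.pyRange_one_succ_right (a := 0) (b := n) hn]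
  simp only [List.foldl_append, List.foldl_cons, List.foldl_nil]

-- A's inner loop over a row equals B's row reduction followed by a single conditional update.
theorem pv_inner_eq (i : Int) (row : List Int) (m : Nat) (st : Int × Int × Int) :
    pvInnerA i row ((m : Int) + 1) st =
      (if (pvRowBest row ((m : Int) + 1)).1 > st.2.2
        then (i, ((pvRowBest row ((m : Int) + 1)).2, (pvRowBest row ((m : Int) + 1)).1))
        else st) := by
  induction m generalizing st with
  | zero =>
      simp only [Nat.cast_zero, zero_add, pvInnerA, pvRowBest]
      rw [show PySem.List.pyRange 0 1 1 = [0] from PySem.List.pyRange_one_singleton 0]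
      simp only [List.foldl_cons, List.foldl_nil]
      split_ifs <;> rfl
  | succ k ih =>
      have hc : ((k + 1 : Nat) : Int) + 1 = ((k : Int) + 1) + 1 := by push_cast; ring
      rw [hc, pv_innerA_succ i row ((k : Int) + 1) (by omega) st,
        pv_rowBest_succ row ((k : Int) + 1) (by omega), ih]
      simp only []
      rcases h : pvRowBest row ((k : Int) + 1) with ⟨rv, rc⟩
      split_ifs <;> first | rfl | (try dsimp only at *
                                   omega)

-- the common middle form of both outer folds
def pvMid (grid : List (List Int)) (n : Int) : Int × Int × Int :=
  (PySem.List.pyRange 0 n 1).foldl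
    (fun st j =>
      if (pvRowBest (PySem.List.pyGetD grid j []) n).1 > st.2.2
        then (j, ((pvRowBest (PySem.List.pyGetD grid j []) n).2,
                  (pvRowBest (PySem.List.pyGetD grid j []) n).1))
        else st)
    (0, 0, PySem.List.pyGetD (PySem.List.pyGetD grid 0 []) 0 0)

theorem pv_A_eq_mid (grid : List (List Int)) (m : Nat) (hm : grid.length = m + 1) :
    findCoordOfMax grid = pvMid grid ((m : Int) + 1) := by
  have hcast : (grid.length : Int) = (m : Int) + 1 := by rw [hm]; push_cast; ring
  unfold findCoordOfMax pvMid
  rw [hcast]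
  exact pv_foldl_congr_mem _ _ _ _ (fun st i _ => pv_inner_eq i (PySem.List.pyGetD grid i []) m st)

theorem pv_B_eq_mid (grid : List (List Int)) (m : Nat) (hm : grid.length = m + 1) :
    findCoordOfMax_alt grid = pvMid grid ((m : Int) + 1) := by
  have hcast : (grid.length : Int) = (m : Int) + 1 := by rw [hm]; push_cast; ring
  unfold findCoordOfMax_alt pvMid
  dsimp only
  rw [PySem.List.enumerate_eq_map_pyRange (d := ((0 : Int), (0 : Int))), List.foldl_map]
  simp only [PySem.List.len_eq, List.length_map, hcast]
  apply pv_foldl_congr_mem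
  intro st j hj
  have hjr := (PySem.List.mem_pyRange_one).1 hj
  have hget : PySem.List.pyGetD (grid.map (fun row => pvRowBest row ((m : Int) + 1))) j
      ((0 : Int), (0 : Int)) = pvRowBest (PySem.List.pyGetD grid j []) ((m : Int) + 1) := by
    rw [PySem.List.pyGetD_eq_getElem _ _ hjr.1 (by simp [hm]; omega),
        PySem.List.pyGetD_eq_getElem _ _ hjr.1 (by simp [hm]; omega)]
    simp
  rw [hget]

-- ===== VERDICT (by name: the statement is the Claim_ definition above) =====
theorem findCoordOfMax_spec : Claim_equal_findCoordOfMax := by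
  intro grid _ hpre
  unfold Spec_findCoordOfMax
  obtain ⟨m, hm⟩ : ∃ m, grid.length = m + 1 := by
    cases grid with
    | nil => exact absurd rfl hpre.1
    | cons a l => exact ⟨l.length, rfl⟩
  rw [pv_A_eq_mid grid m hm, pv_B_eq_mid grid m hm]
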